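-- pv_equiv track=rewrite | github.com/IamMrKaveh/YujTrade | module/signals.py | _signals_match
-- ===== SOURCE A (Python) =====
-- def _signals_match(signal1: str, signal2: str) -> bool:
--     bullish_signals = ['bullish', 'oversold', 'bullish_crossover', 'bullish_above_ma', 'buy_pressure', 'bullish_engulfing', 'price_above_cloud']
--     bearish_signals = ['bearish', 'overbought', 'bearish_crossover', 'bearish_below_ma', 'sell_pressure', 'bearish_engulfing', 'price_below_cloud']
--
--     signal1_is_bullish = any(pattern in signal1.lower() for pattern in bullish_signals)
--     signal2_is_bullish = any(pattern in signal2.lower() for pattern in bullish_signals)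
--     signal1_is_bearish = any(pattern in signal1.lower() for pattern in bearish_signals)
--     signal2_is_bearish = any(pattern in signal2.lower() for pattern in bearish_signals)
--
--     return (signal1_is_bullish and signal2_is_bullish) or (signal1_is_bearish and signal2_is_bearish)
-- ===== SOURCE B (Python) =====
-- # Different algorithm: one left-to-right scan of the lowered text, testing at each
-- # position whether a CORE pattern begins there.  The compound patterns of the
-- # original lists ('bullish_crossover', 'bullish_above_ma', 'bullish_engulfing',
-- # and the bearish counterparts) each contain a core pattern as a substring, so
-- # they are redundant and dropped.
-- _BULL_CORE = ('bullish', 'oversold', 'buy_pressure', 'price_above_cloud')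
-- _BEAR_CORE = ('bearish', 'overbought', 'sell_pressure', 'price_below_cloud')
--
--
-- def _directions(text):
--     text = text.lower()
--     bull = bear = False
--     for i in range(len(text) + 1):
--         if bull and bear:
--             break
--         bull = bull or text.startswith(_BULL_CORE, i)
--         bear = bear or text.startswith(_BEAR_CORE, i)
--     return bull, bear
--
--
-- def _signals_match(signal1: str, signal2: str) -> bool:
--     bull1, bear1 = _directions(signal1)
--     bull2, bear2 = _directions(signal2)
--     return (bull1 and bull2) or (bear1 and bear2)
-- ===== Notes on version B (the rewrite author's own statement) =====
-- stated objective: alternative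
-- what changed: Instead of 28 independent substring ('in') scans, B makes one left-to-right scan per string testing at each position whether a core pattern starts there, and drops the redundant compound patterns (each contains 'bullish'/'bearish' as a substring).
import Mathlib
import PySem

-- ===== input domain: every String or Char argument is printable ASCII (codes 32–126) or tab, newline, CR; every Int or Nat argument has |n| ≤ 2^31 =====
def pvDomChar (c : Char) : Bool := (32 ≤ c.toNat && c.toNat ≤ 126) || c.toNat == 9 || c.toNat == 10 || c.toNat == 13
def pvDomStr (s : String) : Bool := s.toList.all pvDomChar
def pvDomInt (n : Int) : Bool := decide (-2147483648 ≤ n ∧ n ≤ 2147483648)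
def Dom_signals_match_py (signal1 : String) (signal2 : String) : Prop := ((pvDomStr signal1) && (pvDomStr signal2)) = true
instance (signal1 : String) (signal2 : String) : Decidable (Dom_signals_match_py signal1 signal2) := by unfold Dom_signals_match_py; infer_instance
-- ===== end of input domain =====

-- B replaces A's 28 substring ('in') scans by a single left-to-right scan per string,
-- testing at each position whether a core pattern starts there; the compound patterns
-- (which all contain a core pattern as a substring) are dropped as redundant (alternative algorithm).


-- ===== PORT A =====
def signals_match_py (signal1 : String) (signal2 : String) : Bool :=
  let bullish_signals : List String :=
    ["bullish", "oversold", "bullish_crossover", "bullish_above_ma", "buy_pressure",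
     "bullish_engulfing", "price_above_cloud"]
  let bearish_signals : List String :=
    ["bearish", "overbought", "bearish_crossover", "bearish_below_ma", "sell_pressure",
     "bearish_engulfing", "price_below_cloud"]
  let signal1_is_bullish := bullish_signals.any (fun pattern => PySem.Str.isIn pattern (PySem.Str.lower signal1))
  let signal2_is_bullish := bullish_signals.any (fun pattern => PySem.Str.isIn pattern (PySem.Str.lower signal2))
  let signal1_is_bearish := bearish_signals.any (fun pattern => PySem.Str.isIn pattern (PySem.Str.lower signal1))
  let signal2_is_bearish := bearish_signals.any (fun pattern => PySem.Str.isIn pattern (PySem.Str.lower signal2))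
  (signal1_is_bullish && signal2_is_bullish) || (signal1_is_bearish && signal2_is_bearish)

-- ===== PORT B =====
def bullCore : List String := ["bullish", "oversold", "buy_pressure", "price_above_cloud"]
def bearCore : List String := ["bearish", "overbought", "sell_pressure", "price_below_cloud"]

-- text.startswith(pats, i) on the tail cs = text[i:]  (exact: CPython startswith with tuple)
def startsAny (pats : List String) (cs : List Char) : Bool :=
  pats.any (fun p => PySem.Chars.startswith cs p.toList)

-- the loop 'for i in range(len(text)+1)' with the early break, walking the tails of text
def scanDirs : List Char → Bool → Bool → Bool × Bool
  | cs, bull, bear =>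
    if bull && bear then (bull, bear)
    else
      let bull' := bull || startsAny bullCore cs
      let bear' := bear || startsAny bearCore cs
      match cs with
      | [] => (bull', bear')
      | _ :: rest => scanDirs rest bull' bear'

def directions (signal : String) : Bool × Bool :=
  scanDirs (PySem.Str.lower signal).toList false false

def signals_match_py_alt (signal1 : String) (signal2 : String) : Bool :=
  let d1 := directions signal1
  let d2 := directions signal2
  (d1.1 && d2.1) || (d1.2 && d2.2)

-- ===== PRECONDITION & SPEC =====
def Spec_signals_match_py (signal1 : String) (signal2 : String) (out : Bool) : Prop := out = signals_match_py_alt signal1 signal2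
instance (signal1 : String) (signal2 : String) (out : Bool) : Decidable (Spec_signals_match_py signal1 signal2 out) := by unfold Spec_signals_match_py; infer_instance

-- ===== CLAIM (what is proved, stated in full; the proofs are below) =====
def Claim_equal_signals_match_py : Prop := ∀ (signal1 : String) (signal2 : String), Dom_signals_match_py signal1 signal2 → Spec_signals_match_py signal1 signal2 (signals_match_py signal1 signal2)

-- ===== LEMMAS AND PROOFS =====

-- 'some tail of cs starts with a pattern of pats'
def tailHas (pats : List String) : List Char → Bool
  | [] => startsAny pats []
  | c :: rest => startsAny pats (c :: rest) || tailHas pats rest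

theorem scanDirs_eq (cs : List Char) : ∀ (b r : Bool),
    scanDirs cs b r = (b || tailHas bullCore cs, r || tailHas bearCore cs) := by
  induction cs with
  | nil => intro b r; cases b <;> cases r <;> simp [scanDirs, tailHas]
  | cons c rest ih =>
    intro b r
    rw [scanDirs]
    by_cases h : (b && r) = true
    · obtain ⟨hb, hr⟩ := Bool.and_eq_true_iff.mp h
      simp [hb, hr]
    · simp only [h, if_false, ih]
      cases b <;> cases r <;> simp [tailHas, Bool.or_assoc]

theorem tailHas_iff (pats : List String) (cs : List Char) :
    tailHas pats cs = true ↔ ∃ p ∈ pats, ∃ j, p.toList <+: cs.drop j := by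
  induction cs with
  | nil =>
    simp [tailHas, startsAny, List.any_eq_true, PySem.Chars.startswith_iff]
  | cons c rest ih =>
    have hsplit : ∀ p : List Char,
        (∃ j, p <+: (c :: rest).drop j) ↔ (p <+: c :: rest ∨ ∃ j, p <+: rest.drop j) := by
      intro p
      constructor
      · rintro ⟨j, hj⟩
        cases j with
        | zero => exact Or.inl hj
        | succ k => exact Or.inr ⟨k, hj⟩
      · rintro (h | ⟨j, hj⟩)
        exacts [⟨0, h⟩, ⟨j + 1, hj⟩]
    simp only [tailHas, Bool.or_eq_true, ih, startsAny, List.any_eq_true,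
      PySem.Chars.startswith_iff, hsplit]
    constructor
    · rintro (⟨p, hp, h⟩ | ⟨p, hp, h⟩)
      · exact ⟨p, hp, Or.inl h⟩
      · exact ⟨p, hp, Or.inr h⟩
    · rintro ⟨p, hp, h | h⟩
      · exact Or.inl ⟨p, hp, h⟩
      · exact Or.inr ⟨p, hp, h⟩

theorem tailHas_iff_infix (pats : List String) (cs : List Char) :
    tailHas pats cs = true ↔ ∃ p ∈ pats, p.toList <:+: cs := by
  rw [tailHas_iff]
  constructor
  · rintro ⟨p, hp, j, hj⟩
    exact ⟨p, hp, (PySem.Chars.exists_prefix_drop_iff_isIn p.toList cs).mp ⟨j, hj⟩ |>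
      (fun h => (PySem.Chars.isIn_iff_infix p.toList cs).mp h)⟩
  · rintro ⟨p, hp, h⟩
    obtain ⟨j, hj⟩ := (PySem.Chars.exists_prefix_drop_iff_isIn p.toList cs).mpr
      ((PySem.Chars.isIn_iff_infix p.toList cs).mpr h)
    exact ⟨p, hp, j, hj⟩

-- the seven-pattern bullish test of A, over the infix relation
theorem bull_subsume (t : List Char) :
    ((∃ p ∈ (["bullish", "oversold", "bullish_crossover", "bullish_above_ma", "buy_pressure",
       "bullish_engulfing", "price_above_cloud"] : List String), p.toList <:+: t) ↔
     (∃ p ∈ bullCore, p.toList <:+: t)) := by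
  have hb : ∀ u : List Char, "bullish".toList <:+: u → ∀ v, u <:+: v → "bullish".toList <:+: v :=
    fun u hu v huv => hu.trans huv
  constructor
  · rintro ⟨p, hp, h⟩
    fin_cases hp
    · exact ⟨"bullish", by simp [bullCore], h⟩
    · exact ⟨"oversold", by simp [bullCore], h⟩
    · exact ⟨"bullish", by simp [bullCore], hb _ (by decide) _ h⟩
    · exact ⟨"bullish", by simp [bullCore], hb _ (by decide) _ h⟩
    · exact ⟨"buy_pressure", by simp [bullCore], h⟩
    · exact ⟨"bullish", by simp [bullCore], hb _ (by decide) _ h⟩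
    · exact ⟨"price_above_cloud", by simp [bullCore], h⟩
  · rintro ⟨p, hp, h⟩
    fin_cases hp
    · exact ⟨"bullish", by simp, h⟩
    · exact ⟨"oversold", by simp, h⟩
    · exact ⟨"buy_pressure", by simp, h⟩
    · exact ⟨"price_above_cloud", by simp, h⟩

theorem bear_subsume (t : List Char) :
    ((∃ p ∈ (["bearish", "overbought", "bearish_crossover", "bearish_below_ma", "sell_pressure",
       "bearish_engulfing", "price_below_cloud"] : List String), p.toList <:+: t) ↔
     (∃ p ∈ bearCore, p.toList <:+: t)) := by
  have hb : ∀ u : List Char, "bearish".toList <:+: u → ∀ v, u <:+: v → "bearish".toList <:+: v :=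
    fun u hu v huv => hu.trans huv
  constructor
  · rintro ⟨p, hp, h⟩
    fin_cases hp
    · exact ⟨"bearish", by simp [bearCore], h⟩
    · exact ⟨"overbought", by simp [bearCore], h⟩
    · exact ⟨"bearish", by simp [bearCore], hb _ (by decide) _ h⟩
    · exact ⟨"bearish", by simp [bearCore], hb _ (by decide) _ h⟩
    · exact ⟨"sell_pressure", by simp [bearCore], h⟩
    · exact ⟨"bearish", by simp [bearCore], hb _ (by decide) _ h⟩
    · exact ⟨"price_below_cloud", by simp [bearCore], h⟩
  · rintro ⟨p, hp, h⟩
    fin_cases hp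
    · exact ⟨"bearish", by simp, h⟩
    · exact ⟨"overbought", by simp, h⟩
    · exact ⟨"sell_pressure", by simp, h⟩
    · exact ⟨"price_below_cloud", by simp, h⟩

theorem directions_fst (s : String) :
    (directions s).1 =
      (["bullish", "oversold", "bullish_crossover", "bullish_above_ma", "buy_pressure",
        "bullish_engulfing", "price_above_cloud"] : List String).any
        (fun pattern => PySem.Str.isIn pattern (PySem.Str.lower s)) := by
  unfold directions
  rw [scanDirs_eq]
  simp only [Bool.false_or]
  have h1 := tailHas_iff_infix bullCore (PySem.Str.lower s).toList
  have h2 : (["bullish", "oversold", "bullish_crossover", "bullish_above_ma", "buy_pressure",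
        "bullish_engulfing", "price_above_cloud"] : List String).any
        (fun pattern => PySem.Str.isIn pattern (PySem.Str.lower s)) = true ↔
      ∃ p ∈ (["bullish", "oversold", "bullish_crossover", "bullish_above_ma", "buy_pressure",
        "bullish_engulfing", "price_above_cloud"] : List String),
        p.toList <:+: (PySem.Str.lower s).toList := by
    simp [List.any_eq_true, PySem.Str.isIn_iff_infix, PySem.Chars.isIn_iff_infix]
  have := (h1.trans (bull_subsume (PySem.Str.lower s).toList).symm).trans h2.symm
  cases hL : tailHas bullCore (PySem.Str.lower s).toList <;>
    cases hR : (["bullish", "oversold", "bullish_crossover", "bullish_above_ma", "buy_pressure",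
        "bullish_engulfing", "price_above_cloud"] : List String).any
        (fun pattern => PySem.Str.isIn pattern (PySem.Str.lower s)) <;> simp_all

theorem directions_snd (s : String) :
    (directions s).2 =
      (["bearish", "overbought", "bearish_crossover", "bearish_below_ma", "sell_pressure",
        "bearish_engulfing", "price_below_cloud"] : List String).any
        (fun pattern => PySem.Str.isIn pattern (PySem.Str.lower s)) := by
  unfold directions
  rw [scanDirs_eq]
  simp only [Bool.false_or]
  have h1 := tailHas_iff_infix bearCore (PySem.Str.lower s).toList
  have h2 : (["bearish", "overbought", "bearish_crossover", "bearish_below_ma", "sell_pressure",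
        "bearish_engulfing", "price_below_cloud"] : List String).any
        (fun pattern => PySem.Str.isIn pattern (PySem.Str.lower s)) = true ↔
      ∃ p ∈ (["bearish", "overbought", "bearish_crossover", "bearish_below_ma", "sell_pressure",
        "bearish_engulfing", "price_below_cloud"] : List String),
        p.toList <:+: (PySem.Str.lower s).toList := by
    simp [List.any_eq_true, PySem.Str.isIn_iff_infix, PySem.Chars.isIn_iff_infix]
  have := (h1.trans (bear_subsume (PySem.Str.lower s).toList).symm).trans h2.symm
  cases hL : tailHas bearCore (PySem.Str.lower s).toList <;>
    cases hR : (["bearish", "overbought", "bearish_crossover", "bearish_below_ma", "sell_pressure",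
        "bearish_engulfing", "price_below_cloud"] : List String).any
        (fun pattern => PySem.Str.isIn pattern (PySem.Str.lower s)) <;> simp_all

-- ===== VERDICT (by name: the statement is the Claim_ definition above) =====
theorem signals_match_py_spec : Claim_equal_signals_match_py := by
  intro s1 s2 _
  unfold Spec_signals_match_py signals_match_py signals_match_py_alt
  dsimp only
  rw [directions_fst s1, directions_fst s2, directions_snd s1, directions_snd s2]
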